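-- pv_equiv track=rewrite | github.com/andrewjherbert/GNT | GNT900.py | evenParity
-- ===== SOURCE A (Python) =====
-- def evenParity(code):
--     x = code
--     bit = 0
--     parity = False
--     while x:
--         parity = not parity
--         x = x & (x-1)
--     if parity == 0:
--         return code
--     else:
--         return code+128
-- ===== SOURCE B (Python) =====
-- def _parity(x):
--     # recursive bit-scan: parity of the number of 1-bits
--     if x == 0:
--         return False
--     return bool(x & 1) ^ _parity(x >> 1)
--
-- def evenParity(code):
--     return code + 128 if _parity(code) else code
-- ===== Notes on version B (the rewrite author's own statement) =====
-- stated objective: simpler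
-- what changed: Replaces the iterative Kernighan clear-lowest-set-bit loop (one step per set bit, mutable parity flag) by a short structural recursion over the bit string (XOR of the low bit with the parity of the right-shifted rest).
import Mathlib
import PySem

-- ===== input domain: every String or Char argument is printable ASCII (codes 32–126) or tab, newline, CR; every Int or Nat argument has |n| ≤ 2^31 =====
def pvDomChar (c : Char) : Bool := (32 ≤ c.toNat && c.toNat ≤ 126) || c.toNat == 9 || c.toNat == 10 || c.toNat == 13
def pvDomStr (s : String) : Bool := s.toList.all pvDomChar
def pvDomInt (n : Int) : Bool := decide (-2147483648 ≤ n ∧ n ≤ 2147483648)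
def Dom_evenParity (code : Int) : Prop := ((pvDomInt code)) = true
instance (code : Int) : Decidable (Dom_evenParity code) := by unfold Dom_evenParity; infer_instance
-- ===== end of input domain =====

-- B replaces A's iterative Kernighan clear-lowest-set-bit loop by a structural
-- recursion over the bits (low bit XOR parity of the right-shifted rest).

-- ===== PORT A =====
-- A's while loop: one iteration per set bit, x = x & (x-1) (Python's & on ints
-- is Int.land, exact two's-complement semantics).  Fuel only makes the loop
-- total; on every input admitted by Pre_ (0 ≤ code) it is never exhausted.
def evenParityLoopA : Nat → Int → Bool → Bool
  | 0, _, parity => parity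
  | fuel + 1, x, parity =>
    if x ≠ 0 then evenParityLoopA fuel (Int.land x (x - 1)) (!parity)
    else parity

def evenParity (code : Int) : Int :=
  let parity := evenParityLoopA (code.natAbs + 1) code false
  if parity = false then code else code + 128

-- ===== PORT B =====
-- _parity from Source B: recursion on the bits; Python's >> on ints is
-- Int.shiftRight and bool(x & 1) is 'x & 1 ≠ 0' (both exact).  Fuel only makes
-- the recursion total; on every input admitted by Pre_ it is never exhausted.
def parityB : Nat → Int → Bool
  | 0, _ => false
  | fuel + 1, x =>
    if x = 0 then false
    else (decide (Int.land x 1 ≠ 0)) ^^ parityB fuel (Int.shiftRight x 1)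

def evenParity_alt (code : Int) : Int :=
  if parityB (code.natAbs + 1) code then code + 128 else code

-- ===== PRECONDITION & SPEC =====
-- Pre_ excludes negative codes: there Python A's `while x: x = x & (x-1)` never
-- terminates (x stays negative), so A returns on exactly the nonnegative ints.
def Pre_evenParity (code : Int) : Prop := 0 ≤ code
instance (code : Int) : Decidable (Pre_evenParity code) := by unfold Pre_evenParity; infer_instance
def pvWitness_evenParity : Int := (5)

def Spec_evenParity (code : Int) (out : Int) : Prop := out = evenParity_alt code
instance (code : Int) (out : Int) : Decidable (Spec_evenParity code out) := by unfold Spec_evenParity; infer_instance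

-- ===== CLAIM (what is proved, stated in full; the proofs are below) =====
def Claim_equal_evenParity : Prop := ∀ (code : Int), Dom_evenParity code → Pre_evenParity code → Spec_evenParity code (evenParity code)

-- ===== LEMMAS AND PROOFS =====

-- reference parity of a natural number's 1-bits
def natParity (n : Nat) : Bool :=
  if h : n = 0 then false
  else (decide (n % 2 = 1)) ^^ natParity (n / 2)
  decreasing_by exact Nat.div_lt_self (Nat.pos_of_ne_zero h) (by norm_num)

theorem natParity_zero : natParity 0 = false := by simp [natParity]

theorem natParity_pos (n : Nat) (h : n ≠ 0) :
    natParity n = ((decide (n % 2 = 1)) ^^ natParity (n / 2)) := by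
  rw [natParity]; simp [h]

theorem natParity_two_mul (q : Nat) : natParity (2 * q) = natParity q := by
  rcases Nat.eq_zero_or_pos q with h | h
  · simp [h]
  · rw [natParity_pos (2 * q) (by omega)]
    simp [Nat.mul_div_cancel_left q (by norm_num : 0 < 2), Nat.mul_mod_right]

theorem natParity_two_mul_add_one (q : Nat) :
    natParity (2 * q + 1) = !natParity q := by
  rw [natParity_pos (2 * q + 1) (by omega)]
  have h1 : (2 * q + 1) % 2 = 1 := by omega
  have h2 : (2 * q + 1) / 2 = q := by omega
  rw [h1, h2]
  cases natParity q <;> rfl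

theorem land_odd (q : Nat) : (2 * q + 1) &&& (2 * q) = 2 * q := by
  rw [← Nat.bit_true_apply, ← Nat.bit_false_apply, Nat.land_bit]
  simp [Nat.bit_false_apply]

theorem land_even (q : Nat) (h : q ≠ 0) :
    (2 * q) &&& (2 * q - 1) = 2 * (q &&& (q - 1)) := by
  have h1 : 2 * q - 1 = 2 * (q - 1) + 1 := by omega
  rw [h1, ← Nat.bit_false_apply, ← Nat.bit_true_apply, Nat.land_bit]
  simp [Nat.bit_false_apply]

-- clearing the lowest set bit flips the parity
theorem natParity_land_pred (n : Nat) (h : n ≠ 0) :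
    natParity (n &&& (n - 1)) = !natParity n := by
  induction n using Nat.strong_induction_on with
  | _ n ih =>
    rcases Nat.even_or_odd n with he | ho
    · obtain ⟨q, hq⟩ := he
      have hq2 : n = 2 * q := by omega
      have hqne : q ≠ 0 := by omega
      subst hq2
      rw [land_even q hqne, natParity_two_mul, natParity_two_mul,
        ih q (by omega) hqne]
    · obtain ⟨q, hq⟩ := ho
      subst hq
      have : 2 * q + 1 - 1 = 2 * q := by omega
      rw [this, land_odd, natParity_two_mul, natParity_two_mul_add_one]
      cases natParity q <;> rfl

theorem land_le_pred (n : Nat) : n &&& (n - 1) ≤ n - 1 := Nat.and_le_right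

theorem int_land_cast (n m : Nat) :
    Int.land (n : Int) (m : Int) = ((n &&& m : Nat) : Int) := by
  simp [Int.land]

theorem int_shiftRight_cast (n : Nat) :
    Int.shiftRight (n : Int) 1 = ((n >>> 1 : Nat) : Int) := by
  simp [Int.shiftRight]

theorem loopA_eq (fuel : Nat) : ∀ (x : Nat) (p : Bool), x < fuel →
    evenParityLoopA fuel (x : Int) p = (p ^^ natParity x) := by
  induction fuel with
  | zero => intro x p hx; omega
  | succ f ih =>
    intro x p hx
    by_cases h0 : x = 0
    · subst h0; simp [evenParityLoopA, natParity_zero]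
    · have hx1 : ((x : Int)) - 1 = ((x - 1 : Nat) : Int) := by omega
      have hne : ((x : Int)) ≠ 0 := by exact_mod_cast h0
      rw [evenParityLoopA]
      simp only [hne, if_pos, ne_eq, not_false_eq_true, hx1,
        int_land_cast]
      rw [ih (x &&& (x - 1)) (!p) (by have := land_le_pred x; omega)]
      rw [natParity_land_pred x h0]
      cases p <;> cases natParity x <;> rfl

theorem parityB_eq (fuel : Nat) : ∀ (x : Nat), x < fuel →
    parityB fuel (x : Int) = natParity x := by
  induction fuel with
  | zero => intro x hx; omega
  | succ f ih =>
    intro x hx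
    by_cases h0 : x = 0
    · subst h0; simp [parityB, natParity_zero]
    · have hne : ((x : Int)) ≠ 0 := by exact_mod_cast h0
      have hmod : ((x &&& 1 : Nat) : Int) ≠ 0 ↔ x % 2 = 1 := by
        rw [Nat.and_one_is_mod]; omega
      have hland : Int.land (x : Int) 1 = ((x &&& 1 : Nat) : Int) := by
        have h := int_land_cast x 1; simpa using h
      rw [parityB, if_neg hne, hland, int_shiftRight_cast,
        ih (x >>> 1) (by have h2 : x >>> 1 = x / 2 := Nat.shiftRight_one x; omega),
        Nat.shiftRight_one, natParity_pos x h0, decide_eq_decide.mpr hmod]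

-- ===== VERDICT (by name: the statement is the Claim_ definition above) =====
theorem evenParity_spec : Claim_equal_evenParity := by
  intro code _ hpre
  unfold Spec_evenParity evenParity evenParity_alt
  obtain ⟨n, rfl⟩ := Int.eq_ofNat_of_zero_le hpre
  have hn : (Int.natAbs n) = n := Int.natAbs_natCast n
  rw [hn, loopA_eq (n + 1) n false (by omega), parityB_eq (n + 1) n (by omega)]
  cases natParity n <;> simp
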